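-- pv_equiv track=rewrite | github.com/phueb/CHILDES-SRL | check_srl_tags.py | make_srl_string
-- ===== SOURCE A (Python) =====
-- from typing import List
--
-- def make_srl_string(words: List[str],
--                     tags: List[str]) -> str:
--     frame = []
--     chunk = []
--
--     for (token, tag) in zip(words, tags):
--         if tag.startswith("I-"):
--             chunk.append(token)
--         else:
--             if chunk:
--                 frame.append("[" + " ".join(chunk) + "]")
--                 chunk = []
--
--             if tag.startswith("B-"):
--                 chunk.append(tag[2:] + ": " + token)
--             elif tag == "O":
--                 frame.append(token)
--
--     if chunk:
--         frame.append("[" + " ".join(chunk) + "]")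
--
--     return " ".join(frame)
-- ===== SOURCE B (Python) =====
-- from typing import List
--
-- def make_srl_string(words: List[str],
--                     tags: List[str]) -> str:
--     # Pass 1: segment (word, tag) pairs into spans and plain tokens.
--     # A segment is ('span', [label_or_None, tokens]) or ('tok', word).
--     segments = []
--     open_span = None  # the [label_or_None, tokens] list of the span being extended
--     for word, tag in zip(words, tags):
--         if tag.startswith("I-"):
--             if open_span is None:
--                 open_span = [None, []]
--                 segments.append(('span', open_span))
--             open_span[1].append(word)
--         else:
--             open_span = None
--             if tag.startswith("B-"):
--                 open_span = [tag[2:], [word]]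
--                 segments.append(('span', open_span))
--             elif tag == "O":
--                 segments.append(('tok', word))
--     # Pass 2: render each segment.
--     parts = []
--     for kind, payload in segments:
--         if kind == 'tok':
--             parts.append(payload)
--         else:
--             label, toks = payload
--             body = " ".join(toks)
--             parts.append("[" + (label + ": " if label is not None else "") + body + "]")
--     return " ".join(parts)
-- ===== Notes on version B (the rewrite author's own statement) =====
-- stated objective: alternative
-- what changed: B splits the work into two passes: first segment the (word, tag) pairs into a list of span/token segments, then render each segment and join, instead of A's single fold that interleaves bracketing/flushing with iteration state.
import Mathlib
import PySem

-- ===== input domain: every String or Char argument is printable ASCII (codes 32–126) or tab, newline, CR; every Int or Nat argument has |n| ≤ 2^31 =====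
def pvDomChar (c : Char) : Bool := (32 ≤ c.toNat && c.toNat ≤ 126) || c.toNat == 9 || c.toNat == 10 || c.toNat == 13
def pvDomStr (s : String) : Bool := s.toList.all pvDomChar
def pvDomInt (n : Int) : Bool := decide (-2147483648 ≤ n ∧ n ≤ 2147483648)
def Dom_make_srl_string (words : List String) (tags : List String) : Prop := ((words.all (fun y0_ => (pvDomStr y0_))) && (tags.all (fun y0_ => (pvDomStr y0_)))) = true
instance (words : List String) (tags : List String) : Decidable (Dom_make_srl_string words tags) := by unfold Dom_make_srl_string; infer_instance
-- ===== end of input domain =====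

-- B separates segmentation from formatting: pass 1 builds a list of span/token segments, pass 2 renders them; A interleaves both in one fold. Objective: alternative decomposition, same cost.


-- ===== PORT A =====
-- one step of A's loop over (token, tag); state = (frame, chunk)
def srlStepA (st : List String × List String) (p : String × String) : List String × List String :=
  if PySem.Str.startswith p.2 "I-" then
    (st.1, st.2 ++ [p.1])
  else
    let st2 := if st.2.isEmpty then st else (st.1 ++ ["[" ++ PySem.Str.join " " st.2 ++ "]"], [])
    if PySem.Str.startswith p.2 "B-" then
      (st2.1, st2.2 ++ [PySem.Str.slice p.2 (some 2) none ++ ": " ++ p.1])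
    else if p.2 == "O" then
      (st2.1 ++ [p.1], st2.2)
    else
      st2

def make_srl_string (words : List String) (tags : List String) : String :=
  let st := (words.zip tags).foldl srlStepA ([], [])
  let frame := if st.2.isEmpty then st.1 else st.1 ++ ["[" ++ PySem.Str.join " " st.2 ++ "]"]
  PySem.Str.join " " frame

-- ===== PORT B =====
-- a segment: a plain O token, or a span (optional label, its tokens)
inductive PvSeg : Type
  | tok : String → PvSeg
  | span : Option String → List String → PvSeg
deriving DecidableEq, Repr

-- pass 1 of B: segmentation; the open span's (label, tokens) is carried and emitted (at its opening position) when it closes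
def pvBuildSegs : List (String × String) → Option (Option String × List String) → List PvSeg
  | [], none => []
  | [], some (l, ts) => [PvSeg.span l ts]
  | (w, t) :: rest, op =>
    if PySem.Str.startswith t "I-" then
      match op with
      | none => pvBuildSegs rest (some (none, [w]))
      | some (l, ts) => pvBuildSegs rest (some (l, ts ++ [w]))
    else
      (match op with
       | none => ([] : List PvSeg)
       | some (l, ts) => [PvSeg.span l ts]) ++
      (if PySem.Str.startswith t "B-" then
        pvBuildSegs rest (some (some (PySem.Str.slice t (some 2) none), [w]))
      else if t == "O" then
        PvSeg.tok w :: pvBuildSegs rest none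
      else
        pvBuildSegs rest none)

-- pass 2 of B: rendering one segment
def pvRender : PvSeg → String
  | PvSeg.tok w => w
  | PvSeg.span none ts => "[" ++ PySem.Str.join " " ts ++ "]"
  | PvSeg.span (some l) ts => "[" ++ (l ++ ": ") ++ PySem.Str.join " " ts ++ "]"

def make_srl_string_alt (words : List String) (tags : List String) : String :=
  PySem.Str.join " " ((pvBuildSegs (words.zip tags) none).map pvRender)

-- ===== PRECONDITION & SPEC =====
def Spec_make_srl_string (words : List String) (tags : List String) (out : String) : Prop := out = make_srl_string_alt words tags
instance (words : List String) (tags : List String) (out : String) : Decidable (Spec_make_srl_string words tags out) := by unfold Spec_make_srl_string; infer_instance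

-- ===== CLAIM (what is proved, stated in full; the proofs are below) =====
def Claim_equal_make_srl_string : Prop := ∀ (words : List String) (tags : List String), Dom_make_srl_string words tags → Spec_make_srl_string words tags (make_srl_string words tags)

-- ===== LEMMAS AND PROOFS =====

-- A's chunk as determined by B's open-span state
def pvChunkOf : Option (Option String × List String) → List String
  | none => []
  | some (none, ts) => ts
  | some (some l, ts) => (l ++ ": " ++ ts.headD "") :: ts.tail

-- every open span holds at least one token
def pvOk : Option (Option String × List String) → Prop
  | none => True
  | some (_, ts) => ts ≠ []

-- the final frame A produces from a state
def pvFinal (st : List String × List String) : List String :=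
  if st.2.isEmpty then st.1 else st.1 ++ ["[" ++ PySem.Str.join " " st.2 ++ "]"]


lemma pv_chars_join_label (sep a b : List Char) (rest : List (List Char)) :
    PySem.Chars.join sep ((a ++ b) :: rest) = a ++ PySem.Chars.join sep (b :: rest) := by
  cases rest with
  | nil => simp [PySem.Chars.join_singleton]
  | cons c cs =>
    rw [PySem.Chars.join_cons_cons, PySem.Chars.join_cons_cons]
    simp [List.append_assoc]

lemma pv_flush_some (l w : String) (tail : List String) :
    "[" ++ PySem.Str.join " " ((l ++ ": " ++ w) :: tail) ++ "]" = pvRender (PvSeg.span (some l) (w :: tail)) := by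
  apply String.toList_inj.mp
  simp only [pvRender, String.toList_append, PySem.Str.toList_join, List.map_cons]
  rw [pv_chars_join_label]
  simp [List.append_assoc]

lemma pvFinal_nil (frame : List String) : pvFinal (frame, []) = frame := by
  simp [pvFinal]

lemma pvFinal_cons (frame chunk : List String) (h : chunk ≠ []) :
    pvFinal (frame, chunk) = frame ++ ["[" ++ PySem.Str.join " " chunk ++ "]"] := by
  simp [pvFinal, h]

lemma pv_loop (pairs : List (String × String)) :
    ∀ (frame : List String) (op : Option (Option String × List String)), pvOk op →
      pvFinal (pairs.foldl srlStepA (frame, pvChunkOf op)) =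
        frame ++ (pvBuildSegs pairs op).map pvRender := by
  induction pairs with
  | nil =>
    intro frame op hok
    match op with
    | none => rw [List.foldl_nil]; simp [pvChunkOf, pvBuildSegs, pvFinal_nil]
    | some (none, ts) =>
      have hts : ts ≠ [] := hok
      rw [List.foldl_nil, show pvChunkOf (some (none, ts)) = ts from rfl,
          pvFinal_cons frame ts hts]
      simp [pvBuildSegs, pvRender]
    | some (some l, ts) =>
      have hts : ts ≠ [] := hok
      cases ts with
      | nil => exact absurd rfl hts
      | cons w tail =>
        rw [List.foldl_nil,
            show pvChunkOf (some (some l, w :: tail)) = (l ++ ": " ++ w) :: tail from rfl,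
            pvFinal_cons frame _ (by simp), pv_flush_some]
        simp [pvBuildSegs]
  | cons p rest ih =>
    obtain ⟨w, t⟩ := p
    intro frame op hok
    rw [List.foldl_cons]
    cases hI : PySem.Chars.startswith t.toList ['I', '-'] with
    | true =>
      have hstep : ∀ chunk : List String, srlStepA (frame, chunk) (w, t) = (frame, chunk ++ [w]) := by
        intro chunk; simp [srlStepA, hI]
      match op with
      | none =>
        rw [show pvChunkOf none = [] from rfl, hstep,
            show ([] : List String) ++ [w] = pvChunkOf (some (none, [w])) from rfl,
            ih frame (some (none, [w])) (by simp [pvOk])]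
        simp [pvBuildSegs, hI]
      | some (none, ts) =>
        rw [show pvChunkOf (some (none, ts)) = ts from rfl, hstep,
            show ts ++ [w] = pvChunkOf (some (none, ts ++ [w])) from rfl,
            ih frame (some (none, ts ++ [w])) (by simp [pvOk])]
        simp [pvBuildSegs, hI]
      | some (some l, ts) =>
        have hts : ts ≠ [] := hok
        cases ts with
        | nil => exact absurd rfl hts
        | cons w0 tail =>
          rw [show pvChunkOf (some (some l, w0 :: tail)) = (l ++ ": " ++ w0) :: tail from rfl, hstep,
              show ((l ++ ": " ++ w0) :: tail) ++ [w] = pvChunkOf (some (some l, (w0 :: tail) ++ [w])) from rfl,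
              ih frame (some (some l, (w0 :: tail) ++ [w])) (by simp [pvOk])]
          simp [pvBuildSegs, hI]
    | false =>
      -- the else branch: after the (possible) flush the rest of the step only sees an empty chunk
      have htail : ∀ fr2 : List String,
          pvFinal (List.foldl srlStepA (srlStepA (fr2, []) (w, t)) rest)
            = fr2 ++ (if PySem.Chars.startswith t.toList ['B', '-'] = true then
                  pvBuildSegs rest (some (some (PySem.Str.slice t (some 2) none), [w]))
                else if t == "O" then PvSeg.tok w :: pvBuildSegs rest none
                else pvBuildSegs rest none).map pvRender := by
        intro fr2
        cases hB : PySem.Chars.startswith t.toList ['B', '-'] with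
        | true =>
          rw [show srlStepA (fr2, []) (w, t)
                = (fr2, pvChunkOf (some (some (PySem.Str.slice t (some 2) none), [w]))) by
                simp [srlStepA, hI, hB, pvChunkOf],
              ih fr2 _ (by simp [pvOk])]
          simp
        | false =>
          by_cases hO : t = "O"
          · rw [show srlStepA (fr2, []) (w, t) = (fr2 ++ [w], pvChunkOf none) by
                  subst hO
                  simp [srlStepA, pvChunkOf,
                    (by decide : PySem.Chars.startswith ['O'] ['I', '-'] = false),
                    (by decide : PySem.Chars.startswith ['O'] ['B', '-'] = false)],
                ih _ none trivial]
            simp [hO, pvRender, List.append_assoc]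
          · rw [show srlStepA (fr2, []) (w, t) = (fr2, pvChunkOf none) by
                  simp [srlStepA, hI, hB, hO, pvChunkOf],
                ih _ none trivial]
            simp [hO]
      match op with
      | none =>
        rw [show pvChunkOf none = [] from rfl, htail frame]
        simp [pvBuildSegs, hI]
      | some (none, ts) =>
        have hts : ts ≠ [] := hok
        rw [show pvChunkOf (some (none, ts)) = ts from rfl,
            show srlStepA (frame, ts) (w, t)
              = srlStepA (frame ++ ["[" ++ PySem.Str.join " " ts ++ "]"], []) (w, t) by
              simp [srlStepA, hI, hts],
            htail _]
        simp [pvBuildSegs, hI, pvRender, List.append_assoc]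
      | some (some l, ts) =>
        have hts : ts ≠ [] := hok
        cases ts with
        | nil => exact absurd rfl hts
        | cons w0 tail =>
          rw [show pvChunkOf (some (some l, w0 :: tail)) = (l ++ ": " ++ w0) :: tail from rfl,
              show srlStepA (frame, (l ++ ": " ++ w0) :: tail) (w, t)
                = srlStepA (frame ++ [pvRender (PvSeg.span (some l) (w0 :: tail))], []) (w, t) by
                rw [← pv_flush_some]; simp [srlStepA, hI],
              htail _]
          simp [pvBuildSegs, hI, List.append_assoc]

-- ===== VERDICT (by name: the statement is the Claim_ definition above) =====
theorem make_srl_string_spec : Claim_equal_make_srl_string := by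
  intro words tags _
  unfold Spec_make_srl_string make_srl_string make_srl_string_alt
  have h := pv_loop (words.zip tags) [] none trivial
  simp only [pvChunkOf, pvFinal, List.nil_append] at h
  exact congrArg (PySem.Str.join " ") h
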